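-- pv_equiv track=rewrite | github.com/wyk18703232953/myResearch | codeComplex/data copy/filteredData/python/quadratic/python_quadratic_0575.py | generate_test_case
-- ===== SOURCE A (Python) =====
-- def generate_test_case(case_index, n):
--     # 输入结构：
--     # n, k 两个整数 + 一个长度为 n 的字符串 s
--     # 这里将 n 作为字符串长度，k 为 1..n 中确定性的值
--     k = max(1, (case_index % n) + 1) if n > 0 else 1
--     pattern = "RGB"
--     s_chars = []
--     for i in range(n):
--         s_chars.append(pattern[(i + case_index) % 3])
--     s = "".join(s_chars)
--     return n, k, s
-- ===== SOURCE B (Python) =====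
-- def generate_test_case(case_index, n):
--     # Period-3 tiling: build the rotated 3-char block once, repeat and truncate.
--     k = (case_index % n) + 1 if n > 0 else 1
--     m = case_index % 3
--     base = "RGB"[m:] + "RGB"[:m]
--     s = "" if n <= 0 else (base * (n // 3 + 1))[:n]
--     return n, k, s
-- ===== Notes on version B (the rewrite author's own statement) =====
-- stated objective: faster
-- what changed: Replaces the per-character loop (indexing the pattern once per position) with building the 3-char rotated block once and tiling/truncating it via string repetition; the redundant max(1, ...) is dropped since case_index % n + 1 >= 1 for n > 0.
import Mathlib
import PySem

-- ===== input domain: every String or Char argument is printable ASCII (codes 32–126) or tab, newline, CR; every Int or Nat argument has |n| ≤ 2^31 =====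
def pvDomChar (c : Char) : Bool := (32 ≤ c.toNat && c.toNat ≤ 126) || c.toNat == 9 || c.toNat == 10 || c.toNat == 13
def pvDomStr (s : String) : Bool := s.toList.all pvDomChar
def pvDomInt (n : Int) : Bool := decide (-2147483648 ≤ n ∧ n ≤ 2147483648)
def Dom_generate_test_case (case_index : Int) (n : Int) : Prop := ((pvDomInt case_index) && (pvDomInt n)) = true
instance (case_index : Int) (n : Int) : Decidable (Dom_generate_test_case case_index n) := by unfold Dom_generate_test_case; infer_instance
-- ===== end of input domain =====

-- B builds the 3-char rotated block once and tiles/truncates it instead of indexing the pattern per character (objective: faster by a constant factor).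


-- ===== PORT A =====
-- Port of A: per-index loop, appending pattern[(i+case_index)%3] for each i in range(n).
def generate_test_case (case_index : Int) (n : Int) : Int × Int × String :=
  let k : Int := if n > 0 then max 1 (PySem.Int.mod case_index n + 1) else 1
  let pattern : List Char := "RGB".toList
  let s_chars : List Char :=
    (PySem.List.pyRange 0 n 1).foldl
      (fun acc i => acc ++ [PySem.List.pyGetD pattern (PySem.Int.mod (i + case_index) 3) ' ']) []
  (n, k, String.ofList s_chars)

-- ===== PORT B =====
-- Port of B: build the rotated 3-char block once, then tile and truncate.
def generate_test_case_alt (case_index : Int) (n : Int) : Int × Int × String :=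
  let k : Int := if n > 0 then PySem.Int.mod case_index n + 1 else 1
  let m : Int := PySem.Int.mod case_index 3
  let rgb : List Char := "RGB".toList
  let base : List Char := PySem.List.slice rgb (some m) none ++ PySem.List.slice rgb none (some m)
  let s : List Char :=
    if n ≤ 0 then []
    else PySem.List.slice (PySem.List.pyRepeat base (PySem.Int.floordiv n 3 + 1)) none (some n)
  (n, k, String.ofList s)

-- ===== PRECONDITION & SPEC =====
def Spec_generate_test_case (case_index : Int) (n : Int) (out : Int × Int × String) : Prop := out = generate_test_case_alt case_index n
instance (case_index : Int) (n : Int) (out : Int × Int × String) : Decidable (Spec_generate_test_case case_index n out) := by unfold Spec_generate_test_case; infer_instance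

-- ===== CLAIM (what is proved, stated in full; the proofs are below) =====
def Claim_equal_generate_test_case : Prop := ∀ (case_index : Int) (n : Int), Dom_generate_test_case case_index n → Spec_generate_test_case case_index n (generate_test_case case_index n)

-- ===== LEMMAS AND PROOFS =====

-- Index into t copies of a 3-element block: position i reads the block at i % 3.
theorem flatten_rep3_getElem? (b0 b1 b2 : Char) (t i : Nat) (h : i < 3*t) :
    ((List.replicate t [b0,b1,b2]).flatten)[i]? = [b0,b1,b2][i % 3]? := by
  induction t generalizing i with
  | zero => omega
  | succ t ih =>
    rw [List.replicate_succ, List.flatten_cons]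
    by_cases hi : i < 3
    · rw [List.getElem?_append_left (by simp [hi])]
      rw [Nat.mod_eq_of_lt hi]
    · rw [List.getElem?_append_right (by simp; omega)]
      have h3 : (i - 3) % 3 = i % 3 := by omega
      simp only [List.length_cons, List.length_nil]
      rw [← h3]; exact ih (i-3) (by omega)

-- A's per-character loop equals B's tiled-and-truncated block, for n > 0.
theorem s_eq (c n : Int) (hn : 0 < n) :
    (PySem.List.pyRange 0 n 1).foldl
      (fun acc i => acc ++ [PySem.List.pyGetD "RGB".toList (PySem.Int.mod (i + c) 3) ' ']) []
    = PySem.List.slice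
        (PySem.List.pyRepeat
          (PySem.List.slice "RGB".toList (some (PySem.Int.mod c 3)) none ++
           PySem.List.slice "RGB".toList none (some (PySem.Int.mod c 3)))
          (PySem.Int.floordiv n 3 + 1)) none (some n) := by
  have h30 : (0:Int) < 3 := by norm_num
  have hm0 : 0 ≤ PySem.Int.mod c 3 := PySem.Int.mod_nonneg c h30
  have hm3 : PySem.Int.mod c 3 < 3 := PySem.Int.mod_lt c h30
  rw [PySem.List.foldl_append_singleton_eq_map, PySem.List.pyRange_one,
      PySem.List.slice_from _ hm0, PySem.List.slice_to _ hm0,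
      PySem.List.slice_to _ (le_of_lt hn), PySem.Int.floordiv_eq_ediv_of_pos h30,
      PySem.Int.mod_eq_emod_of_pos h30]
  simp only [PySem.List.pyRepeat, List.map_map, List.nil_append]
  apply List.ext_getElem?
  intro i
  rw [List.getElem?_take, List.getElem?_map]
  by_cases hi : (i:Int) < n
  · have hiN : i < (n - 0).toNat := by omega
    rw [if_pos (by omega), List.getElem?_range hiN, Option.map_some]
    simp only [Function.comp]
    rw [PySem.Int.mod_eq_emod_of_pos h30]
    have hm : c % 3 = 0 ∨ c % 3 = 1 ∨ c % 3 = 2 := by omega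
    have hr : i % 3 = 0 ∨ i % 3 = 1 ∨ i % 3 = 2 := by omega
    rcases hm with hm | hm | hm
    · have hbase : List.drop (Int.toNat 0) "RGB".toList ++ List.take (Int.toNat 0) "RGB".toList = ['R','G','B'] := by decide
      rw [hm, hbase, flatten_rep3_getElem? _ _ _ _ _ (by omega)]
      rcases hr with hr | hr | hr <;> rw [hr] <;>
        [ rw [show (0+(i:Int)+c)%3 = 0 from by omega];
          rw [show (0+(i:Int)+c)%3 = 1 from by omega];
          rw [show (0+(i:Int)+c)%3 = 2 from by omega] ] <;> rfl
    · have hbase : List.drop (Int.toNat 1) "RGB".toList ++ List.take (Int.toNat 1) "RGB".toList = ['G','B','R'] := by decide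
      rw [hm, hbase, flatten_rep3_getElem? _ _ _ _ _ (by omega)]
      rcases hr with hr | hr | hr <;> rw [hr] <;>
        [ rw [show (0+(i:Int)+c)%3 = 1 from by omega];
          rw [show (0+(i:Int)+c)%3 = 2 from by omega];
          rw [show (0+(i:Int)+c)%3 = 0 from by omega] ] <;> rfl
    · have hbase : List.drop (Int.toNat 2) "RGB".toList ++ List.take (Int.toNat 2) "RGB".toList = ['B','R','G'] := by decide
      rw [hm, hbase, flatten_rep3_getElem? _ _ _ _ _ (by omega)]
      rcases hr with hr | hr | hr <;> rw [hr] <;>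
        [ rw [show (0+(i:Int)+c)%3 = 2 from by omega];
          rw [show (0+(i:Int)+c)%3 = 0 from by omega];
          rw [show (0+(i:Int)+c)%3 = 1 from by omega] ] <;> rfl
  · rw [if_neg (by omega), List.getElem?_eq_none (by simp; omega)]
    rfl

-- ===== VERDICT (by name: the statement is the Claim_ definition above) =====
theorem generate_test_case_spec : Claim_equal_generate_test_case := by
  intro c n _
  unfold Spec_generate_test_case
  simp only [generate_test_case, generate_test_case_alt]
  by_cases hn : 0 < n
  · have hk : max 1 (PySem.Int.mod c n + 1) = PySem.Int.mod c n + 1 := by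
      have := PySem.Int.mod_nonneg c hn; omega
    rw [if_pos hn, if_pos hn, if_neg (by omega), hk, s_eq c n hn]
  · rw [if_neg hn, if_neg hn, if_pos (by omega),
        PySem.List.pyRange_one_eq_nil (by omega)]
    rfl
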